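-- pv_equiv track=rewrite | github.com/LHG4650/LHG_FN | DW_AI/DW_detect.py | set_detect_area
-- ===== SOURCE A (Python) =====
-- def set_detect_area(x, x0, y, y0, x_num, y_num):
--     area_list=[]
--     x_gap = int((x0 - x) / x_num)
--     y_gap = int((y0 - y) / y_num)
--
--     for j in range(y_num):
--         y_point = y + y_gap * (j)
--         y0_point = y + y_gap * (j + 1)
--
--         for i in range(x_num):
--             x_point = x + x_gap * (i)
--             x0_point = x + x_gap * (i + 1)
--
--             point = (x_point, x0_point, y_point, y0_point)
--
--             area_list.append(point)
--
--     return area_list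
-- ===== SOURCE B (Python) =====
-- def set_detect_area(x, x0, y, y0, x_num, y_num):
--     x_gap = int((x0 - x) / x_num)
--     y_gap = int((y0 - y) / y_num)
--     out = []
--     if y_num > 0:
--         rows = []
--         row = [(x + x_gap * i, x + x_gap * (i + 1), y, y + y_gap)
--                for i in range(x_num)]
--         for _ in range(y_num):
--             rows.append(row)
--             row = [(a, b, c + y_gap, d + y_gap) for (a, b, c, d) in row]
--         out = [p for r in rows for p in r]
--     return out
-- ===== Notes on version B (the rewrite author's own statement) =====
-- stated objective: alternative
-- what changed: B computes only the first row of cells from the gap arithmetic and then produces each further row by translating the previous row by y_gap (incremental row propagation), instead of recomputing both x and y endpoints arithmetically inside nested loops.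
import Mathlib
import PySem

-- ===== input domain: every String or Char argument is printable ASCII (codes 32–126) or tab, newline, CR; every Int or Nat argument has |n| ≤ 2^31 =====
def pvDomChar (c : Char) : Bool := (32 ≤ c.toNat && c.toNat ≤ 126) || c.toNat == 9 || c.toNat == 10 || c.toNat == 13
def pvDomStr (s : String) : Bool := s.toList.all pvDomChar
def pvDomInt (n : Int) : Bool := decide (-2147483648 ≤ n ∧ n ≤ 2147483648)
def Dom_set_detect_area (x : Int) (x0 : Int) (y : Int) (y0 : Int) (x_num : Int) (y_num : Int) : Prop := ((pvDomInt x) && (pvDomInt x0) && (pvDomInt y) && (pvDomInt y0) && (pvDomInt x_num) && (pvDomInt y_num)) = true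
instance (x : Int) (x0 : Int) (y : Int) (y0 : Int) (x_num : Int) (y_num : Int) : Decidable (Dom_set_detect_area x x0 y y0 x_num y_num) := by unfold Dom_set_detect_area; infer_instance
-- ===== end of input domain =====

-- B computes only the first row of cells and obtains every further row by translating the
-- previous row by y_gap, instead of recomputing both endpoints inside nested loops
-- (alternative decomposition; same cost).
-- int((a)/b) is exact truncating division for |a| ≤ 2^32: ported as PySem.Int.truncdiv.

-- ===== PORT A =====
def set_detect_area (x : Int) (x0 : Int) (y : Int) (y0 : Int) (x_num : Int) (y_num : Int) : List (Int × Int × Int × Int) :=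
  let x_gap := PySem.Int.truncdiv (x0 - x) x_num
  let y_gap := PySem.Int.truncdiv (y0 - y) y_num
  (PySem.List.pyRange 0 y_num 1).foldl (fun area_list j =>
    let y_point := y + y_gap * j
    let y0_point := y + y_gap * (j + 1)
    (PySem.List.pyRange 0 x_num 1).foldl (fun acc i =>
      let x_point := x + x_gap * i
      let x0_point := x + x_gap * (i + 1)
      acc ++ [(x_point, x0_point, y_point, y0_point)]) area_list) []

-- ===== PORT B =====
def set_detect_area_alt (x : Int) (x0 : Int) (y : Int) (y0 : Int) (x_num : Int) (y_num : Int) : List (Int × Int × Int × Int) :=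
  let x_gap := PySem.Int.truncdiv (x0 - x) x_num
  let y_gap := PySem.Int.truncdiv (y0 - y) y_num
  if 0 < y_num then
    let row := (PySem.List.pyRange 0 x_num 1).map (fun i =>
      (x + x_gap * i, x + x_gap * (i + 1), y, y + y_gap))
    let rows := ((PySem.List.pyRange 0 y_num 1).foldl
      (fun (st : List (List (Int × Int × Int × Int)) × List (Int × Int × Int × Int)) _ =>
        (st.1 ++ [st.2], st.2.map (fun p => (p.1, p.2.1, p.2.2.1 + y_gap, p.2.2.2 + y_gap))))
      ([], row)).1
    rows.flatMap (fun r => r)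
  else []

-- ===== PRECONDITION & SPEC =====
-- A raises ZeroDivisionError when x_num = 0 or y_num = 0 (the gap divisions); exactly those inputs are excluded.
def Pre_set_detect_area (x : Int) (x0 : Int) (y : Int) (y0 : Int) (x_num : Int) (y_num : Int) : Prop :=
  x_num ≠ 0 ∧ y_num ≠ 0
instance (x : Int) (x0 : Int) (y : Int) (y0 : Int) (x_num : Int) (y_num : Int) : Decidable (Pre_set_detect_area x x0 y y0 x_num y_num) := by unfold Pre_set_detect_area; infer_instance
def pvWitness_set_detect_area : Int × Int × Int × Int × Int × Int := (0, 10, 0, 6, 3, 2)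

def Spec_set_detect_area (x : Int) (x0 : Int) (y : Int) (y0 : Int) (x_num : Int) (y_num : Int) (out : List (Int × Int × Int × Int)) : Prop := out = set_detect_area_alt x x0 y y0 x_num y_num
instance (x : Int) (x0 : Int) (y : Int) (y0 : Int) (x_num : Int) (y_num : Int) (out : List (Int × Int × Int × Int)) : Decidable (Spec_set_detect_area x x0 y y0 x_num y_num out) := by unfold Spec_set_detect_area; infer_instance

-- ===== CLAIM (what is proved, stated in full; the proofs are below) =====
def Claim_equal_set_detect_area : Prop := ∀ (x : Int) (x0 : Int) (y : Int) (y0 : Int) (x_num : Int) (y_num : Int), Dom_set_detect_area x x0 y y0 x_num y_num → Pre_set_detect_area x x0 y y0 x_num y_num → Spec_set_detect_area x x0 y y0 x_num y_num (set_detect_area x x0 y y0 x_num y_num)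

-- ===== LEMMAS AND PROOFS =====

-- the j-th row of cells, as A computes it
def rowAt (x gx y gy x_num : Int) (j : Int) : List (Int × Int × Int × Int) :=
  (PySem.List.pyRange 0 x_num 1).map (fun i => (x + gx * i, x + gx * (i + 1), y + gy * j, y + gy * (j + 1)))

-- translating a row by gy moves it to the next row index
lemma shift_rowAt (x gx y gy x_num : Int) (j : Int) :
    (rowAt x gx y gy x_num j).map (fun p => (p.1, p.2.1, p.2.2.1 + gy, p.2.2.2 + gy))
      = rowAt x gx y gy x_num (j + 1) := by
  unfold rowAt
  rw [List.map_map]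
  refine List.map_congr_left ?_
  intro i _
  simp only [Function.comp_apply, Prod.mk.injEq, true_and]
  exact ⟨by ring, by ring⟩

-- B's fold starting from the j-th row collects the translated rows j, j+1, …
lemma rows_fold (x gx y gy x_num : Int) :
    ∀ (l : List Int) (acc : List (List (Int × Int × Int × Int))) (j : Int),
      (l.foldl
        (fun (st : List (List (Int × Int × Int × Int)) × List (Int × Int × Int × Int)) _ =>
          (st.1 ++ [st.2], st.2.map (fun p => (p.1, p.2.1, p.2.2.1 + gy, p.2.2.2 + gy))))
        (acc, rowAt x gx y gy x_num j)).1
        = acc ++ (List.range l.length).map (fun t : Nat => rowAt x gx y gy x_num (j + (t : Int))) := by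
  intro l
  induction l with
  | nil => intro acc j; simp
  | cons a l ih =>
    intro acc j
    rw [List.foldl_cons]
    simp only [shift_rowAt]
    rw [ih (acc ++ [rowAt x gx y gy x_num j]) (j + 1)]
    have hmap : (List.range l.length).map
          ((fun t : Nat => rowAt x gx y gy x_num (j + (t : Int))) ∘ Nat.succ)
        = (List.range l.length).map (fun t : Nat => rowAt x gx y gy x_num (j + 1 + (t : Int))) := by
      refine List.map_congr_left ?_
      intro t _
      simp only [Function.comp_apply]
      congr 1
      push_cast
      ring
    rw [List.length_cons, List.range_succ_eq_map, List.map_cons, List.map_map, hmap]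
    simp [List.append_assoc]

theorem set_detect_area_spec : Claim_equal_set_detect_area := by
  intro x x0 y y0 x_num y_num _ hpre
  unfold Spec_set_detect_area set_detect_area set_detect_area_alt
  simp only []
  by_cases hy : 0 < y_num
  case neg =>
    rw [if_neg hy,
        show PySem.List.pyRange 0 y_num 1 = [] from PySem.List.pyRange_one_eq_nil (by omega)]
    rfl
  rw [if_pos hy]
  rw [PySem.List.foldl_congr_mem _ _
        (fun area_list j =>
          area_list ++ (PySem.List.pyRange 0 x_num 1).map (fun i =>
            (x + PySem.Int.truncdiv (x0 - x) x_num * i,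
             x + PySem.Int.truncdiv (x0 - x) x_num * (i + 1),
             y + PySem.Int.truncdiv (y0 - y) y_num * j,
             y + PySem.Int.truncdiv (y0 - y) y_num * (j + 1)))) _
        (by intro acc j _; exact PySem.List.foldl_append_singleton_eq_map ..),
      PySem.List.foldl_append_eq_flatMap]
  have hrow0 : (PySem.List.pyRange 0 x_num 1).map (fun i =>
        (x + PySem.Int.truncdiv (x0 - x) x_num * i,
         x + PySem.Int.truncdiv (x0 - x) x_num * (i + 1), y,
         y + PySem.Int.truncdiv (y0 - y) y_num))
      = rowAt x (PySem.Int.truncdiv (x0 - x) x_num) y (PySem.Int.truncdiv (y0 - y) y_num) x_num 0 := by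
    unfold rowAt
    refine List.map_congr_left ?_
    intro i _
    simp only [Prod.mk.injEq, true_and]
    exact ⟨by ring, by ring⟩
  rw [hrow0, rows_fold, List.nil_append, List.nil_append, List.flatMap_map]
  obtain ⟨Y, hY⟩ : ∃ Y : Nat, y_num = (Y : Int) := ⟨y_num.toNat, by omega⟩
  subst hY
  rw [PySem.List.pyRange_zero_natCast, List.flatMap_map, List.length_map,
      List.length_range]
  congr 1
  funext t
  congr 1
  ring
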